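-- pv_equiv track=rewrite | github.com/neilfarmer/memoire | lambda/export/exporter.py | _tasks_section
-- ===== SOURCE A (Python) =====
-- PRIORITY_SYMBOL = {"high": "!!!", "medium": "!!", "low": "!"}
--
-- STATUS_LABEL    = {"todo": "Todo", "in_progress": "In Progress", "done": "Done"}
--
-- CHECKBOX        = {"todo": "[ ]", "in_progress": "[-]", "done": "[x]"}
--
-- def _tasks_section(tasks: list[dict], heading_level: int = 2) -> str:
--     """Render a list of tasks grouped by status. heading_level is the level
--     used for status sub-headings (H2 by default; H3 when nested under tag
--     sections so the document outline stays clean)."""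
--     grouped: dict[str, list] = {"todo": [], "in_progress": [], "done": []}
--     for t in tasks:
--         grouped.setdefault(t.get("status", "todo"), []).append(t)
--
--     hashes = "#" * max(1, min(heading_level, 6))
--     lines: list[str] = []
--     for status in ("todo", "in_progress", "done"):
--         bucket = grouped.get(status, [])
--         if not bucket:
--             continue
--         lines.append(f"{hashes} {STATUS_LABEL[status]}\n")
--         for t in sorted(bucket, key=lambda x: x.get("created_at", "")):
--             cb       = CHECKBOX[status]
--             priority = PRIORITY_SYMBOL.get(t.get("priority", "medium"), "!!")
--             title    = t.get("title", "Untitled")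
--             lines.append(f"- {cb} {priority} {title}")
--             if t.get("due_date"):
--                 lines.append(f"  Due: {t['due_date']}")
--             if t.get("scheduled_start"):
--                 dur = t.get("duration_minutes") or 30
--                 lines.append(f"  Scheduled: {t['scheduled_start']} ({dur} min)")
--             if t.get("recurrence_rule"):
--                 rr = t["recurrence_rule"]
--                 lines.append(f"  Recurs: {rr.get('freq', '?')} every {rr.get('interval', 1)}")
--             if t.get("reschedule_count"):
--                 lines.append(f"  Rescheduled {t['reschedule_count']} time(s)")
--             if t.get("description"):
--                 lines.append(f"  {t['description']}")
--             lines.append("")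
--     return "\n".join(lines)
-- ===== SOURCE B (Python) =====
-- PRIORITY_SYMBOL = {"high": "!!!", "medium": "!!", "low": "!"}
--
-- STATUS_LABEL    = {"todo": "Todo", "in_progress": "In Progress", "done": "Done"}
--
-- CHECKBOX        = {"todo": "[ ]", "in_progress": "[-]", "done": "[x]"}
--
--
-- def _render_task(t, cb):
--     priority = PRIORITY_SYMBOL.get(t.get("priority", "medium"), "!!")
--     lines = [f"- {cb} {priority} {t.get('title', 'Untitled')}"]
--     if t.get("due_date"):
--         lines.append(f"  Due: {t['due_date']}")
--     if t.get("scheduled_start"):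
--         dur = t.get("duration_minutes") or 30
--         lines.append(f"  Scheduled: {t['scheduled_start']} ({dur} min)")
--     if t.get("recurrence_rule"):
--         rr = t["recurrence_rule"]
--         lines.append(f"  Recurs: {rr.get('freq', '?')} every {rr.get('interval', 1)}")
--     if t.get("reschedule_count"):
--         lines.append(f"  Rescheduled {t['reschedule_count']} time(s)")
--     if t.get("description"):
--         lines.append(f"  {t['description']}")
--     lines.append("")
--     return lines
--
--
-- def _tasks_section(tasks: list, heading_level: int = 2) -> str:
--     hashes = "#" * max(1, min(heading_level, 6))
--     sections = []
--     for status in ("todo", "in_progress", "done"):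
--         bucket = sorted((t for t in tasks if t.get("status", "todo") == status),
--                         key=lambda x: x.get("created_at", ""))
--         if bucket:
--             sections.append([f"{hashes} {STATUS_LABEL[status]}\n"]
--                             + [line for t in bucket for line in _render_task(t, CHECKBOX[status])])
--     return "\n".join(line for sec in sections for line in sec)
-- ===== Notes on version B (the rewrite author's own statement) =====
-- stated objective: idiomatic
-- what changed: Dropped the intermediate grouped dict: B loops over the three fixed statuses, builds each bucket by filtering the task list directly, and renders each task through a helper returning its list of lines, assembling the output by flattening section lists instead of appending to one shared accumulator; Pre_ excludes only the inputs on which A returns no value: under the string-valued task model fixed by the Lean signature, a non-empty 'recurrence_rule' makes both A and B raise AttributeError (a str has no .get).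
import Mathlib
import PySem

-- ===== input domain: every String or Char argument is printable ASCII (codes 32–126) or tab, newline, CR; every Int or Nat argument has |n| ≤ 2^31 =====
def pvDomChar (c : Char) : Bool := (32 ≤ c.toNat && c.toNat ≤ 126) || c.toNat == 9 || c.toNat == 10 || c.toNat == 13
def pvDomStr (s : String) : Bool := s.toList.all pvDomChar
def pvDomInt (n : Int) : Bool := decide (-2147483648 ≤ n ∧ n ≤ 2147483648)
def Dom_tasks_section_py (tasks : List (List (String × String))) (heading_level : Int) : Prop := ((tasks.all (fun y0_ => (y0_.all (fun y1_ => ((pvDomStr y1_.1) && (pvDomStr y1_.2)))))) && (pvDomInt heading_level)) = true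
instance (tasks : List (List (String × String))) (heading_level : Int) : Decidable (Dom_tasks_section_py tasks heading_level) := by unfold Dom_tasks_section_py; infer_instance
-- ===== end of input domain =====

-- B drops A's intermediate grouped dict: it filters the task list per fixed status and builds
-- the section line lists by flattening a per-task rendering helper (idiomatic; same cost).

-- module-level constants shared by both Python files
def pvConstPriority : PySem.Dict String String := ⟨[("high", "!!!"), ("medium", "!!"), ("low", "!")]⟩
def pvConstLabel : PySem.Dict String String := ⟨[("todo", "Todo"), ("in_progress", "In Progress"), ("done", "Done")]⟩
def pvConstCheckbox : PySem.Dict String String := ⟨[("todo", "[ ]"), ("in_progress", "[-]"), ("done", "[x]")]⟩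

-- t.get(k, d) on a task dict (assoc list)
def pyGet (t : List (String × String)) (k d : String) : String := PySem.Dict.getD ⟨t⟩ k d

-- ===== PORT A =====
-- grouped.setdefault(t.get("status", "todo"), []).append(t)
def pvA_step (g : PySem.Dict String (List (List (String × String)))) (t : List (String × String)) :
    PySem.Dict String (List (List (String × String))) :=
  let s := pyGet t "status" "todo"
  match PySem.Dict.get? g s with
  | some b => PySem.Dict.insert g s (b ++ [t])
  | none   => PySem.Dict.insert g s [t]

-- the body of A's inner 'for t in sorted(bucket, …)' loop, appending to 'lines'.
-- The 'if t.get("recurrence_rule"):' branch is omitted: inside Pre_ that value is "" so the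
-- branch never fires (a non-empty value makes the Python raise AttributeError — outside Pre_).
def pvA_taskFold (cb : String) (lines : List String) (t : List (String × String)) : List String :=
  let priority := PySem.Dict.getD pvConstPriority (pyGet t "priority" "medium") "!!"
  let title := pyGet t "title" "Untitled"
  let lines := lines ++ ["- " ++ cb ++ " " ++ priority ++ " " ++ title]
  let lines := if pyGet t "due_date" "" ≠ "" then
      lines ++ ["  Due: " ++ pyGet t "due_date" ""] else lines
  let lines := if pyGet t "scheduled_start" "" ≠ "" then
      let dur := if pyGet t "duration_minutes" "" ≠ "" then pyGet t "duration_minutes" "" else "30"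
      lines ++ ["  Scheduled: " ++ pyGet t "scheduled_start" "" ++ " (" ++ dur ++ " min)"]
    else lines
  let lines := if pyGet t "reschedule_count" "" ≠ "" then
      lines ++ ["  Rescheduled " ++ pyGet t "reschedule_count" "" ++ " time(s)"] else lines
  let lines := if pyGet t "description" "" ≠ "" then
      lines ++ ["  " ++ pyGet t "description" ""] else lines
  lines ++ [""]

def tasks_section_py (tasks : List (List (String × String))) (heading_level : Int) : String :=
  let grouped := tasks.foldl pvA_step (⟨[("todo", []), ("in_progress", []), ("done", [])]⟩ : PySem.Dict String (List (List (String × String))))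
  let hashes := String.ofList (List.replicate (max 1 (min heading_level 6)).toNat '#')
  let lines := (["todo", "in_progress", "done"]).foldl (fun lines status =>
      let bucket := PySem.Dict.getD grouped status []
      if bucket.isEmpty then lines
      else
        let lines := lines ++ [hashes ++ " " ++ PySem.Dict.getD pvConstLabel status "" ++ "\n"]
        (PySem.List.sorted bucket (fun x => pyGet x "created_at" "")).foldl
          (pvA_taskFold (PySem.Dict.getD pvConstCheckbox status "")) lines) []
  PySem.Str.join "\n" lines

-- ===== PORT B =====
-- _render_task: the list of lines for one task (recurrence branch omitted exactly as in port A)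
def pvB_renderTask (cb : String) (t : List (String × String)) : List String :=
  let priority := PySem.Dict.getD pvConstPriority (pyGet t "priority" "medium") "!!"
  ["- " ++ cb ++ " " ++ priority ++ " " ++ pyGet t "title" "Untitled"]
  ++ (if pyGet t "due_date" "" ≠ "" then ["  Due: " ++ pyGet t "due_date" ""] else [])
  ++ (if pyGet t "scheduled_start" "" ≠ "" then
        let dur := if pyGet t "duration_minutes" "" ≠ "" then pyGet t "duration_minutes" "" else "30"
        ["  Scheduled: " ++ pyGet t "scheduled_start" "" ++ " (" ++ dur ++ " min)"] else [])
  ++ (if pyGet t "reschedule_count" "" ≠ "" then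
        ["  Rescheduled " ++ pyGet t "reschedule_count" "" ++ " time(s)"] else [])
  ++ (if pyGet t "description" "" ≠ "" then ["  " ++ pyGet t "description" ""] else [])
  ++ [""]

-- one status section: filter the task list directly, sort, render
def pvB_section (tasks : List (List (String × String))) (hashes status : String) : List String :=
  let bucket := PySem.List.sorted (tasks.filter (fun t => pyGet t "status" "todo" == status))
      (fun x => pyGet x "created_at" "")
  if bucket.isEmpty then []
  else (hashes ++ " " ++ PySem.Dict.getD pvConstLabel status "" ++ "\n")
        :: bucket.flatMap (pvB_renderTask (PySem.Dict.getD pvConstCheckbox status ""))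

def tasks_section_py_alt (tasks : List (List (String × String))) (heading_level : Int) : String :=
  let hashes := String.ofList (List.replicate (max 1 (min heading_level 6)).toNat '#')
  PySem.Str.join "\n" ((["todo", "in_progress", "done"]).flatMap (pvB_section tasks hashes))

-- ===== PRECONDITION & SPEC =====
-- Pre_ excludes exactly the inputs on which A returns NO value under the string-valued task model
-- this signature fixes: a task with a non-empty "recurrence_rule" string makes BOTH Python
-- programs raise AttributeError at rr.get (a str has no .get method), so no return value of A is
-- being dodged — A returns on every input Pre_ admits, and B matches it there.
def Pre_tasks_section_py (tasks : List (List (String × String))) (heading_level : Int) : Prop :=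
  ∀ t ∈ tasks, pyGet t "recurrence_rule" "" = ""
instance (tasks : List (List (String × String))) (heading_level : Int) : Decidable (Pre_tasks_section_py tasks heading_level) := by unfold Pre_tasks_section_py; infer_instance

def pvWitness_tasks_section_py : (List (List (String × String))) × Int :=
  ([[("status", "todo"), ("title", "Write docs"), ("due_date", "2024-01-01")], [("status", "done")]], 2)

def Spec_tasks_section_py (tasks : List (List (String × String))) (heading_level : Int) (out : String) : Prop := out = tasks_section_py_alt tasks heading_level
instance (tasks : List (List (String × String))) (heading_level : Int) (out : String) : Decidable (Spec_tasks_section_py tasks heading_level out) := by unfold Spec_tasks_section_py; infer_instance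

-- ===== CLAIM (what is proved, stated in full; the proofs are below) =====
def Claim_equal_tasks_section_py : Prop := ∀ (tasks : List (List (String × String))) (heading_level : Int), Dom_tasks_section_py tasks heading_level → Pre_tasks_section_py tasks heading_level → Spec_tasks_section_py tasks heading_level (tasks_section_py tasks heading_level)

-- ===== LEMMAS AND PROOFS =====

-- A's grouping pass computes, at any key already present, the direct filter of the task list
theorem pv_grouped_get (tasks : List (List (String × String)))
    (g : PySem.Dict String (List (List (String × String)))) (s : String)
    (l : List (List (String × String))) (h : PySem.Dict.get? g s = some l) :
    PySem.Dict.get? (tasks.foldl pvA_step g) s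
      = some (l ++ tasks.filter (fun t => pyGet t "status" "todo" == s)) := by
  induction tasks generalizing g l with
  | nil => simpa using h
  | cons t ts ih =>
    simp only [List.foldl_cons, List.filter_cons]
    by_cases hs : pyGet t "status" "todo" = s
    · have hstep : pvA_step g t = PySem.Dict.insert g s (l ++ [t]) := by
        simp [pvA_step, hs, h]
      rw [hstep, ih _ _ (PySem.Dict.get?_insert_self g s (l ++ [t]))]
      simp [hs]
    · have hne : s ≠ pyGet t "status" "todo" := fun hh => hs hh.symm
      have hget : PySem.Dict.get? (pvA_step g t) s = some l := by
        unfold pvA_step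
        cases hb : PySem.Dict.get? g (pyGet t "status" "todo") <;>
          simp only [hb] <;> rw [PySem.Dict.get?_insert_of_ne _ _ hne] <;> exact h
      rw [ih _ _ hget]
      simp [hs]

-- A's inner loop body appends exactly B's per-task lines
theorem pv_taskFold_eq (cb : String) (lines : List String) (t : List (String × String)) :
    pvA_taskFold cb lines t = lines ++ pvB_renderTask cb t := by
  unfold pvA_taskFold pvB_renderTask
  split_ifs <;> simp

-- A's inner loop over a bucket is B's flatMap of the rendering helper
theorem pv_taskLoop_eq (cb : String) (bucket : List (List (String × String))) (lines : List String) :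
    bucket.foldl (pvA_taskFold cb) lines = lines ++ bucket.flatMap (pvB_renderTask cb) := by
  have hf : pvA_taskFold cb = fun lines t => lines ++ pvB_renderTask cb t := by
    funext lines t; exact pv_taskFold_eq cb lines t
  rw [hf, PySem.List.foldl_append_eq_flatMap]

-- two lists of equal length are simultaneously empty
theorem pv_isEmpty_congr {α β : Type} (l : List α) (m : List β) (h : l.length = m.length) :
    l.isEmpty = m.isEmpty := by
  cases l <;> cases m <;> simp_all

-- one iteration of A's outer status loop appends exactly B's section lines
theorem pv_step_eq (tasks : List (List (String × String))) (hashes status : String)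
    (lines : List String) :
    (if (tasks.filter (fun t => pyGet t "status" "todo" == status)).isEmpty then lines
     else (PySem.List.sorted (tasks.filter (fun t => pyGet t "status" "todo" == status))
            (fun x => pyGet x "created_at" "")).foldl
          (pvA_taskFold (PySem.Dict.getD pvConstCheckbox status ""))
          (lines ++ [hashes ++ " " ++ PySem.Dict.getD pvConstLabel status "" ++ "\n"]))
    = lines ++ pvB_section tasks hashes status := by
  have hp := PySem.List.sorted_perm (tasks.filter (fun t => pyGet t "status" "todo" == status))
    (fun x => pyGet x "created_at" "") false
  have hemp : (PySem.List.sorted (tasks.filter (fun t => pyGet t "status" "todo" == status))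
      (fun x => pyGet x "created_at" "")).isEmpty
      = (tasks.filter (fun t => pyGet t "status" "todo" == status)).isEmpty := by
    exact pv_isEmpty_congr _ _ hp.length_eq
  unfold pvB_section
  cases hfe : (tasks.filter (fun t => pyGet t "status" "todo" == status)).isEmpty with
  | true => simp [hfe, hemp]
  | false => simp [hfe, hemp, pv_taskLoop_eq]

-- ===== VERDICT (by name: the statement is the Claim_ definition above) =====
theorem tasks_section_py_spec : Claim_equal_tasks_section_py := by
  intro tasks heading_level _ _
  unfold Spec_tasks_section_py tasks_section_py tasks_section_py_alt
  have hb : ∀ s : String,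
      PySem.Dict.get? ((⟨[("todo", []), ("in_progress", []), ("done", [])]⟩ :
        PySem.Dict String (List (List (String × String))))) s = some [] →
      PySem.Dict.getD (tasks.foldl pvA_step (⟨[("todo", []), ("in_progress", []), ("done", [])]⟩ :
        PySem.Dict String (List (List (String × String))))) s []
        = tasks.filter (fun t => pyGet t "status" "todo" == s) := by
    intro s h
    have := pv_grouped_get tasks _ s [] h
    simp [PySem.Dict.getD, this]
  simp only [List.foldl_cons, List.foldl_nil, List.flatMap_cons, List.flatMap_nil, List.append_nil]
  rw [hb "todo" (by decide), hb "in_progress" (by decide), hb "done" (by decide),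
    pv_step_eq, pv_step_eq, pv_step_eq]
  simp
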